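-- pv_equiv track=rewrite | github.com/AyeshaKhan157/Codility | Game_of_codes.py | solution
-- ===== SOURCE A (Python) =====
-- from itertools import combinations
--
-- def solution(S):
--     max_len = 0
--     letters = set(S)
--
--     for k in range(1, 4):
--         for combo in combinations(letters, k):
--             allowed = set(combo)
--             filtered = [c for c in S if c in allowed]
--
--             # Now count blocks and total length
--             blocks = []
--             prev = ''
--             count = 0
--
--             for c in filtered:
--                 if c == prev:
--                     count += 1
--                 else:
--                     if prev:
--                         blocks.append((prev, count))
--                     prev = c
--                     count = 1
--             if prev:
--                 blocks.append((prev, count))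
--
--             if len(blocks) <= 3:
--                 total = sum(c for _, c in blocks)
--                 max_len = max(max_len, total)
--
--     return max_len
-- ===== SOURCE B (Python) =====
-- from itertools import combinations
--
-- def solution(S):
--     # Run-length encode S once; each candidate letter set is then scored by a
--     # single constant-state pass over the runs (no per-combo filtered/blocks lists).
--     runs = []
--     for c in S:
--         if runs and runs[-1][0] == c:
--             runs[-1][1] += 1
--         else:
--             runs.append([c, 1])
--
--     best = 0
--     for k in range(1, 4):
--         for combo in combinations(set(S), k):
--             prev = None
--             nblocks = 0
--             total = 0
--             for ch, cnt in runs: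
--                 if ch in combo:
--                     if ch != prev:
--                         nblocks += 1
--                         prev = ch
--                     total += cnt
--             if nblocks <= 3:
--                 best = max(best, total)
--     return best
-- ===== Notes on version B (the rewrite author's own statement) =====
-- stated objective: alternative
-- what changed: B run-length encodes S once and scores every candidate letter set by a single constant-state pass over the runs (prev/nblocks/total), instead of A's per-combo rebuild of a filtered character list and an explicit blocks list from S.
import Mathlib
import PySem

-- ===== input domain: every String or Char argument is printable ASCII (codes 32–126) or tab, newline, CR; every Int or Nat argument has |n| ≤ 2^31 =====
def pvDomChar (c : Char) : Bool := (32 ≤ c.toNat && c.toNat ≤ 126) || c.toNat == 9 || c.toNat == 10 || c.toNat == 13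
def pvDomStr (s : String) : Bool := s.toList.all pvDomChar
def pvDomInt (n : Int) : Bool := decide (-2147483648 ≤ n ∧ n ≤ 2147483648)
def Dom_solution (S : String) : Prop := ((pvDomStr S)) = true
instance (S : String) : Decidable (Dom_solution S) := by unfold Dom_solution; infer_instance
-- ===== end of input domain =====

-- B changes the per-combo work: one constant-state pass over a run-length encoding computed
-- once, instead of A's per-combo filtered list + blocks list rebuilt from S (objective: alternative).
-- A iterates over combinations of a Python set; the result is independent of that iteration
-- order (a max over combos), so both ports enumerate combinations of the first-occurrence list.

-- ===== PORT A =====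
-- inner loop of A: state (prev, count, blocks); Python's prev = '' is modelled as none
def blocksStep (st : Option Char × Int × List (Char × Int)) (c : Char) :
    Option Char × Int × List (Char × Int) :=
  if st.1 = some c then (st.1, st.2.1 + 1, st.2.2)
  else
    match st.1 with
    | some p => (some c, 1, st.2.2 ++ [(p, st.2.1)])
    | none => (some c, 1, st.2.2)

-- body of A's 'for combo in combinations(letters, k)' loop
def solutionStepA (S : List Char) (maxLen : Int) (combo : List Char) : Int :=
  let allowed : PySem.Set Char := PySem.Set.ofList combo
  let filtered := S.filter (fun c => PySem.Set.contains allowed c)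
  let st := filtered.foldl blocksStep (none, 0, [])
  let blocks : List (Char × Int) :=
    match st.1 with
    | some p => st.2.2 ++ [(p, st.2.1)]
    | none => st.2.2
  if blocks.length ≤ 3 then max maxLen (blocks.foldl (fun s pc => s + pc.2) 0) else maxLen

def solution (S : String) : Int :=
  (PySem.List.pyRange 1 4 1).foldl
    (fun maxLen k =>
      (PySem.List.combinations (PySem.Set.ofList S.toList) k.toNat).foldl
        (solutionStepA S.toList) maxLen) 0

-- ===== PORT B =====
-- one step of B's run-length encoding loop (runs[-1][1] += 1 modelled on the last element)
def rleStep (runs : List (Char × Int)) (c : Char) : List (Char × Int) :=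
  match runs.getLast? with
  | some (c', k) => if c' = c then runs.dropLast ++ [(c', k + 1)] else runs ++ [(c, 1)]
  | none => runs ++ [(c, 1)]

-- body of B's 'for ch, cnt in runs' loop: state (prev, nblocks, total)
def comboStepB (combo : List Char) (st : Option Char × Int × Int) (r : Char × Int) :
    Option Char × Int × Int :=
  if combo.contains r.1 then
    if st.1 = some r.1 then (st.1, st.2.1, st.2.2 + r.2)
    else (some r.1, st.2.1 + 1, st.2.2 + r.2)
  else st

-- body of B's per-combo loop
def solutionStepB (runs : List (Char × Int)) (best : Int) (combo : List Char) : Int :=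
  let st := runs.foldl (comboStepB combo) (none, 0, 0)
  if st.2.1 ≤ 3 then max best st.2.2 else best

def solution_alt (S : String) : Int :=
  (PySem.List.pyRange 1 4 1).foldl
    (fun best k =>
      (PySem.List.combinations (PySem.Set.ofList S.toList) k.toNat).foldl
        (solutionStepB (S.toList.foldl rleStep [])) best) 0

-- ===== PRECONDITION & SPEC =====
def Spec_solution (S : String) (out : Int) : Prop := out = solution_alt S
instance (S : String) (out : Int) : Decidable (Spec_solution S out) := by unfold Spec_solution; infer_instance

-- ===== CLAIM (what is proved, stated in full; the proofs are below) =====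
def Claim_equal_solution : Prop := ∀ (S : String), Dom_solution S → Spec_solution S (solution S)

-- ===== LEMMAS AND PROOFS =====

-- common middle form: a fused scan over the characters with B's (prev, nblocks, total) state
def fusedStep (p : Char → Bool) (st : Option Char × Int × Int) (c : Char) :
    Option Char × Int × Int :=
  if p c then
    if st.1 = some c then (st.1, st.2.1, st.2.2 + 1)
    else (some c, st.2.1 + 1, st.2.2 + 1)
  else st

-- B-side: a run of length 1 is one fused step
theorem comboStepB_one (combo : List Char) (st : Option Char × Int × Int) (c : Char) :
    comboStepB combo st (c, 1) = fusedStep (fun x => combo.contains x) st c := rfl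

-- B-side: extending a run by one is one more fused step
theorem comboStepB_succ (combo : List Char) (st : Option Char × Int × Int) (c : Char) (k : Int) :
    comboStepB combo st (c, k + 1) =
      fusedStep (fun x => combo.contains x) (comboStepB combo st (c, k)) c := by
  obtain ⟨prev, nb, tot⟩ := st
  by_cases hc : c ∈ combo
  · by_cases hp : prev = some c <;>
      simp [comboStepB, fusedStep, hc, hp, add_assoc]
  · simp [comboStepB, fusedStep, hc]

-- B-side key step: consuming a char into the RLE commutes with the combo scan
theorem comboFold_rleStep (combo : List Char) (runs : List (Char × Int))
    (st : Option Char × Int × Int) (c : Char) :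
    (rleStep runs c).foldl (comboStepB combo) st =
      fusedStep (fun x => combo.contains x) (runs.foldl (comboStepB combo) st) c := by
  cases h : runs.getLast? with
  | none =>
    have hnil : runs = [] := List.getLast?_eq_none_iff.mp h
    subst hnil
    simp [rleStep, comboStepB_one]
  | some r =>
    obtain ⟨c', k⟩ := r
    obtain ⟨pre, rfl⟩ := List.getLast?_eq_some_iff.mp h
    by_cases hcc : c' = c
    · subst hcc
      simp [rleStep, h, List.foldl_append, comboStepB_succ]
    · simp [rleStep, h, hcc, List.foldl_append, comboStepB_one]

-- B-side: the combo scan over the RLE of l is the fused scan over l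
theorem comboFold_rle (combo : List Char) (l : List Char) (st : Option Char × Int × Int) :
    (l.foldl rleStep []).foldl (comboStepB combo) st =
      l.foldl (fusedStep (fun x => combo.contains x)) st := by
  induction l using List.reverseRecOn with
  | nil => rfl
  | append_singleton l c ih =>
    rw [List.foldl_append, List.foldl_append, List.foldl_cons, List.foldl_nil,
      List.foldl_cons, List.foldl_nil, comboFold_rleStep, ih]

-- projection of A's block-building state onto B's (prev, nblocks, total) state
def projA (st : Option Char × Int × List (Char × Int)) : Option Char × Int × Int :=
  (st.1, (st.2.2.length : Int) + (if st.1.isSome then 1 else 0),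
    st.2.2.foldl (fun s pc => s + pc.2) 0 + st.2.1)

-- A-side: the block-building fold simulates the fused scan (with p = true) under projA;
-- the invariant 'prev = none → count = 0' is preserved
theorem blocksFold_sim (m : List Char) (st : Option Char × Int × List (Char × Int))
    (h0 : st.1 = none → st.2.1 = 0) :
    projA (m.foldl blocksStep st) = m.foldl (fusedStep (fun _ => true)) (projA st)
      ∧ ((m.foldl blocksStep st).1 = none → (m.foldl blocksStep st).2.1 = 0) := by
  induction m generalizing st with
  | nil => exact ⟨rfl, h0⟩
  | cons c m ih =>
    obtain ⟨prev, count, blocks⟩ := st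
    have hstep : projA (blocksStep (prev, count, blocks) c) =
        fusedStep (fun _ => true) (projA (prev, count, blocks)) c := by
      by_cases h1 : prev = some c
      · simp [blocksStep, fusedStep, projA, h1, add_assoc]
      · cases prev with
        | none =>
          have : count = 0 := h0 rfl
          simp [blocksStep, fusedStep, projA, this]
        | some p =>
          simp [blocksStep, fusedStep, projA, h1, List.foldl_append]
    have hne : (blocksStep (prev, count, blocks) c).1 ≠ none := by
      by_cases h1 : (prev, count, blocks).1 = some c
      · simp [blocksStep, show prev = some c from h1]
      · cases prev <;> simp [blocksStep, h1]
    have hsome : (blocksStep (prev, count, blocks) c).1 = none → (blocksStep (prev, count, blocks) c).2.1 = 0 :=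
      fun h => absurd h hne
    rw [List.foldl_cons, List.foldl_cons, ← hstep]
    exact ih _ hsome

-- the fused scan with predicate p is the true-fused scan over the filtered list
theorem fusedScan_filter (p : Char → Bool) (l : List Char) (st : Option Char × Int × Int) :
    l.foldl (fusedStep p) st = (l.filter p).foldl (fusedStep (fun _ => true)) st := by
  have hf : fusedStep p = fun st c => if p c then fusedStep (fun _ => true) st c else st := by
    funext st c
    simp [fusedStep]
  rw [hf, PySem.List.foldl_if_eq_foldl_filter]

-- membership in set(combo) is membership in the combo tuple
theorem contains_ofList (combo : List Char) (c : Char) :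
    PySem.Set.contains (PySem.Set.ofList combo) c = combo.contains c := by
  simp only [PySem.Set.contains_eq_listContains, List.contains_eq_mem, PySem.Set.mem_ofList]

-- per-combo equality: A's filtered/blocks computation = B's scan of the precomputed RLE
theorem step_eq (S : List Char) (m : Int) (combo : List Char) :
    solutionStepA S m combo = solutionStepB (S.foldl rleStep []) m combo := by
  simp only [solutionStepA, solutionStepB]
  rw [comboFold_rle]
  have hfilter : (S.filter fun c => PySem.Set.contains (PySem.Set.ofList combo) c) =
      S.filter (fun c => combo.contains c) := by
    simp only [contains_ofList]
  rw [hfilter]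
  rw [show (S.foldl (fusedStep fun x => combo.contains x) (none, 0, 0)) =
      ((S.filter fun c => combo.contains c).foldl (fusedStep fun _ => true) (none, 0, 0)) from
    fusedScan_filter _ _ _]
  set F := S.filter (fun c => combo.contains c) with hF
  obtain ⟨hsim, hinv⟩ := blocksFold_sim F (none, 0, []) (fun _ => rfl)
  set st := F.foldl blocksStep (none, 0, []) with hst
  have hproj0 : projA ((none : Option Char), (0 : Int), ([] : List (Char × Int))) = (none, 0, 0) := by
    simp [projA]
  rw [hproj0] at hsim
  rw [← hsim]
  obtain ⟨prev, count, blocks⟩ := st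
  cases prev with
  | none =>
    have hc0 : count = 0 := hinv rfl
    simp [projA, hc0]
  | some p =>
    simp only [projA, List.foldl_append, List.foldl_cons, List.foldl_nil,
      List.length_append, List.length_cons, List.length_nil, Option.isSome_some, if_true]
    split_ifs with h1 h2 h2
    · rfl
    · omega
    · omega
    · rfl

-- ===== VERDICT (by name: the statement is the Claim_ definition above) =====
theorem solution_spec : Claim_equal_solution := by
  intro S _
  show solution S = solution_alt S
  unfold solution solution_alt
  have h : solutionStepA S.toList = solutionStepB (S.toList.foldl rleStep []) := by
    funext m combo
    exact step_eq S.toList m combo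
  rw [h]
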